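-- pv_equiv track=rewrite | github.com/brkwok/usaco | dualpal/dualpal.py | check_dual
-- ===== SOURCE A (Python) =====
-- def parse_num_to_base(base: int, num: int):
--     res = []
--     while num > 0:
--         res.append(str(num % base))
--         num //= base
--
--     return "".join(res)[::-1]
--
-- def is_palin(s):
--     return s == s[::-1]
--
-- def check_dual(n):
--     count = 0
--     for i in range(2, 11):
--         if is_palin(parse_num_to_base(i, n)):
--             count += 1
--
--     if count > 1:
--         return True
--
--     return False
-- ===== SOURCE B (Python) =====
-- def check_dual(n):
--     def reversed_in_base(base):
--         rev, temp = 0, n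
--         while temp > 0:
--             rev = rev * base + temp % base
--             temp //= base
--         return rev
--     return sum(1 for base in range(2, 11) if reversed_in_base(base) == n) > 1
-- ===== Notes on version B (the rewrite author's own statement) =====
-- stated objective: alternative
-- what changed: Replaces building each base-b digit string and comparing it with its slice-reversal by a purely numeric digit-reversal (rev = rev*base + temp%base) compared with n, aggregated with a counting generator expression instead of an explicit counter loop.
-- outside the precondition, e.g. on check_dual(-7): A returns True, B returns False
import Mathlib
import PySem

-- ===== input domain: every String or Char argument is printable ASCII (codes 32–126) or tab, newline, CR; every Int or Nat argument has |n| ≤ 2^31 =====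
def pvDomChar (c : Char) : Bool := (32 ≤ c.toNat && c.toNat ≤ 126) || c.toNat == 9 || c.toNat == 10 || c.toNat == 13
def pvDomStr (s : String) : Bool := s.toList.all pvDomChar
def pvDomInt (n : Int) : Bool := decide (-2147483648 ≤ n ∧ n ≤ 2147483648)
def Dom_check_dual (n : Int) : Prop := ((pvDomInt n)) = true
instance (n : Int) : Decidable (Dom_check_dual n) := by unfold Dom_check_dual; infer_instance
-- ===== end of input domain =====

-- B replaces A's per-base digit-string building + slice-reversal palindrome test by a purely
-- numeric digit-reversal compared with n (alternative decomposition); proved equal on Pre_.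

-- ===== PORT A =====
-- while num > 0: res.append(str(num % base)); num //= base   (fuel only makes the loop total)
def pvParseLoop (base : Int) : Nat → Int → List String → List String
  | 0, _, res => res
  | fuel + 1, num, res =>
    if num > 0 then
      pvParseLoop base fuel (PySem.Int.floordiv num base)
        (res ++ [PySem.Int.toStr (PySem.Int.mod num base)])
    else res

def parse_num_to_base (base : Int) (num : Int) : String :=
  (PySem.Str.slice? (PySem.Str.join "" (pvParseLoop base num.toNat num [])) none none (-1)).getD ""

def is_palin (s : String) : Bool :=
  s == (PySem.Str.slice? s none none (-1)).getD ""

def check_dual (n : Int) : Bool :=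
  let count : Int :=
    (PySem.List.pyRange 2 11 1).foldl
      (fun count i => if is_palin (parse_num_to_base i n) then count + 1 else count) 0
  if count > 1 then true else false

-- ===== PORT B =====
-- while temp > 0: rev = rev*base + temp % base; temp //= base   (fuel only makes the loop total)
def pvRevLoop (base : Int) : Nat → Int → Int → Int
  | 0, rev, _ => rev
  | fuel + 1, rev, temp =>
    if temp > 0 then
      pvRevLoop base fuel (rev * base + PySem.Int.mod temp base) (PySem.Int.floordiv temp base)
    else rev

def check_dual_alt (n : Int) : Bool :=
  decide (((PySem.List.pyRange 2 11 1).countP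
    (fun base => pvRevLoop base n.toNat 0 n == n)) > 1)

-- ===== PRECONDITION & SPEC =====
-- Pre_ restricts to the problem's natural domain of nonnegative integers (USACO dualpal reads a
-- positive integer); on negative inputs A's digit loop yields the empty string so A accidentally
-- returns True, while B's numeric reversal naturally returns False.
def Pre_check_dual (n : Int) : Prop := 0 ≤ n
instance (n : Int) : Decidable (Pre_check_dual n) := by unfold Pre_check_dual; infer_instance
def pvWitness_check_dual : Int := (585)

def Spec_check_dual (n : Int) (out : Bool) : Prop := out = check_dual_alt n
instance (n : Int) (out : Bool) : Decidable (Spec_check_dual n out) := by unfold Spec_check_dual; infer_instance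

-- ===== CLAIM (what is proved, stated in full; the proofs are below) =====
def Claim_equal_check_dual : Prop := ∀ (n : Int), Dom_check_dual n → Pre_check_dual n → Spec_check_dual n (check_dual n)

-- ===== LEMMAS AND PROOFS =====

-- little-endian digits of num in base b (same fuel discipline as both loops)
def pvDigits (b : Int) : Nat → Int → List Int
  | 0, _ => []
  | fuel + 1, num =>
    if num > 0 then PySem.Int.mod num b :: pvDigits b fuel (PySem.Int.floordiv num b) else []

def pvValLE (b : Int) (l : List Int) : Int := l.foldr (fun d acc => d + b * acc) 0

def pvDigitChar (d : Int) : Char := Char.ofNat (48 + d.toNat)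

theorem pvParseLoop_eq (b : Int) (fuel : Nat) :
    ∀ (num : Int) (res : List String),
      pvParseLoop b fuel num res = res ++ (pvDigits b fuel num).map PySem.Int.toStr := by
  induction fuel with
  | zero => intro num res; simp [pvParseLoop, pvDigits]
  | succ f ih =>
    intro num res
    by_cases h : num > 0
    · simp [pvParseLoop, pvDigits, h, ih]
    · simp [pvParseLoop, pvDigits, h]

theorem pvRevLoop_eq (b : Int) (fuel : Nat) :
    ∀ (rev temp : Int),
      pvRevLoop b fuel rev temp = (pvDigits b fuel temp).foldl (fun r d => r * b + d) rev := by
  induction fuel with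
  | zero => intro rev temp; simp [pvRevLoop, pvDigits]
  | succ f ih =>
    intro rev temp
    by_cases h : temp > 0
    · simp [pvRevLoop, pvDigits, h, ih]
    · simp [pvRevLoop, pvDigits, h]

theorem pvDigits_bounds (b : Int) (hb : 2 ≤ b) (fuel : Nat) :
    ∀ (num : Int), ∀ d ∈ pvDigits b fuel num, 0 ≤ d ∧ d < b := by
  induction fuel with
  | zero => intro num d hd; simp [pvDigits] at hd
  | succ f ih =>
    intro num d hd
    by_cases h : num > 0
    · simp [pvDigits, h] at hd
      rcases hd with h1 | h1
      · subst h1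
        exact ⟨PySem.Int.mod_nonneg _ (by omega), PySem.Int.mod_lt _ (by omega)⟩
      · exact ih _ _ h1
    · simp [pvDigits, h] at hd

theorem pvDigits_val (b : Int) (hb : 2 ≤ b) (fuel : Nat) :
    ∀ (num : Int), 0 ≤ num → num.toNat ≤ fuel → pvValLE b (pvDigits b fuel num) = num := by
  induction fuel with
  | zero => intro num h0 hf; simp [pvDigits, pvValLE]; omega
  | succ f ih =>
    intro num h0 hf
    by_cases h : num > 0
    · have hdiv : 0 ≤ PySem.Int.floordiv num b :=
        (PySem.Int.le_floordiv_iff_mul_le (by omega)).mpr (by nlinarith)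
      have hlt : PySem.Int.floordiv num b < num :=
        (PySem.Int.floordiv_lt_iff_lt_mul (by omega)).mpr (by nlinarith)
      have hrec := ih (PySem.Int.floordiv num b) hdiv (by omega)
      have hmod := PySem.Int.floordiv_mul_add_mod num b
      simp only [pvDigits, h, if_true, pvValLE, List.foldr] at hrec ⊢
      nlinarith [hrec]
    · simp [pvDigits, h, pvValLE]; omega

theorem pvValLE_inj (b : Int) (hb : 2 ≤ b) :
    ∀ (l1 l2 : List Int), l1.length = l2.length →
      (∀ d ∈ l1, 0 ≤ d ∧ d < b) → (∀ d ∈ l2, 0 ≤ d ∧ d < b) →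
      pvValLE b l1 = pvValLE b l2 → l1 = l2 := by
  intro l1
  induction l1 with
  | nil => intro l2 hlen _ _ _; cases l2 <;> simp_all
  | cons d1 t1 ih =>
    intro l2 hlen hb1 hb2 hval
    cases l2 with
    | nil => simp at hlen
    | cons d2 t2 =>
      have hd1 := hb1 d1 (by simp)
      have hd2 := hb2 d2 (by simp)
      simp only [pvValLE, List.foldr] at hval
      have hdeq : d1 = d2 := by
        have h1 : (d1 + b * (t1.foldr (fun d acc => d + b * acc) 0)) % b = d1 % b := by
          simp [Int.add_mul_emod_self_left]
        have h2 : (d2 + b * (t2.foldr (fun d acc => d + b * acc) 0)) % b = d2 % b := by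
          simp [Int.add_mul_emod_self_left]
        have e1 : d1 % b = d1 := Int.emod_eq_of_lt hd1.1 hd1.2
        have e2 : d2 % b = d2 := Int.emod_eq_of_lt hd2.1 hd2.2
        rw [hval] at h1
        rw [h2, e1, e2] at h1
        omega
      subst hdeq
      have htail : pvValLE b t1 = pvValLE b t2 := by
        have : b * pvValLE b t1 = b * pvValLE b t2 := by
          simp only [pvValLE]; omega
        exact mul_left_cancel₀ (by omega : b ≠ 0) this
      have := ih t2 (by simpa using hlen)
        (fun d hd => hb1 d (by simp [hd])) (fun d hd => hb2 d (by simp [hd])) htail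
      simp [this]

theorem pvDigitChar_inj (d1 d2 : Int) (h1 : 0 ≤ d1) (h2 : 0 ≤ d2)
    (hlt1 : d1 < 10) (hlt2 : d2 < 10) (h : pvDigitChar d1 = pvDigitChar d2) : d1 = d2 := by
  interval_cases d1 <;> interval_cases d2 <;> simp_all [pvDigitChar]

theorem pvToChars_digit (d : Int) (h0 : 0 ≤ d) (h10 : d < 10) :
    PySem.Int.toChars d = [pvDigitChar d] := by
  interval_cases d <;> decide

theorem pvMap_inj (l1 l2 : List Int) (hb1 : ∀ d ∈ l1, 0 ≤ d ∧ d < 10)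
    (hb2 : ∀ d ∈ l2, 0 ≤ d ∧ d < 10)
    (hm : l1.map pvDigitChar = l2.map pvDigitChar) : l1 = l2 := by
  induction l1 generalizing l2 with
  | nil => cases l2 <;> simp_all
  | cons a t ih =>
    cases l2 with
    | nil => simp at hm
    | cons a2 t2 =>
      simp at hm
      have ha := pvDigitChar_inj a a2 (hb1 a (by simp)).1 (hb2 a2 (by simp)).1
        (hb1 a (by simp)).2 (hb2 a2 (by simp)).2 hm.1
      have ht := ih t2 (fun d hd => hb1 d (by simp [hd]))
        (fun d hd => hb2 d (by simp [hd])) hm.2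
      simp [ha, ht]

theorem pvValLE_append_singleton (b : Int) (xs : List Int) (d : Int) :
    pvValLE b (xs ++ [d]) = pvValLE b xs + d * b ^ xs.length := by
  induction xs with
  | nil => simp [pvValLE]
  | cons x t ih =>
    simp only [pvValLE, List.foldr, List.cons_append, List.length_cons] at ih ⊢
    rw [ih]; ring

theorem pvFoldl_eq_valLE_reverse (b : Int) (l : List Int) :
    ∀ a : Int, l.foldl (fun r d => r * b + d) a = pvValLE b l.reverse + a * b ^ l.length := by
  induction l with
  | nil => intro a; simp [pvValLE]
  | cons d t ih =>
    intro a
    simp only [List.foldl, List.reverse_cons, List.length_cons]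
    rw [ih, pvValLE_append_singleton]
    simp [List.length_reverse]
    ring

-- A's per-base test in terms of the digit list
theorem pvA_test (b n : Int) (hb : 2 ≤ b) (hb10 : b ≤ 10) (_hn : 0 ≤ n) :
    is_palin (parse_num_to_base b n) =
      decide (pvDigits b n.toNat n = (pvDigits b n.toNat n).reverse) := by
  have hbounds := pvDigits_bounds b hb n.toNat n
  set l := pvDigits b n.toNat n with hl
  have hjoin : (PySem.Str.join "" (pvParseLoop b n.toNat n [])).toList = l.map pvDigitChar := by
    rw [PySem.Str.toList_join, pvParseLoop_eq]
    have hmap : ((l.map PySem.Int.toStr).map String.toList)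
        = (l.map pvDigitChar).map (fun c => [c]) := by
      simp only [List.map_map]
      apply List.map_congr_left
      intro d hd
      have hdb := hbounds d hd
      simp only [Function.comp]
      rw [PySem.Int.toList_toStr, pvToChars_digit d hdb.1 (by omega)]
    rw [← hl]
    simp only [List.nil_append, hmap]
    have he : ("" : String).toList = [] := rfl
    rw [he, PySem.Chars.join_nil_singletons]
  set s := PySem.Str.join "" (pvParseLoop b n.toNat n []) with hs
  have hparse : parse_num_to_base b n = String.ofList ((l.map pvDigitChar).reverse) := by
    unfold parse_num_to_base
    rw [← hs, PySem.Str.slice?_none_none_neg_one, Option.getD_some, hjoin]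
  unfold is_palin
  rw [hparse, PySem.Str.slice?_none_none_neg_one, Option.getD_some, String.toList_ofList]
  rw [List.reverse_reverse]
  rw [Bool.eq_iff_iff]
  simp only [beq_iff_eq, decide_eq_true_iff]
  have hbnd10 : ∀ d ∈ l, 0 ≤ d ∧ d < 10 := fun d hd =>
    ⟨(hbounds d hd).1, by have := (hbounds d hd).2; omega⟩
  constructor
  · intro h
    have h2 : (l.map pvDigitChar).reverse = l.map pvDigitChar := by
      have := congrArg String.toList h
      simpa using this
    rw [← List.map_reverse] at h2
    exact (pvMap_inj l.reverse l (fun d hd => hbnd10 d (List.mem_reverse.mp hd)) hbnd10 h2).symm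
  · intro h
    rw [← List.map_reverse, ← h]

-- B's per-base test in terms of the digit list
theorem pvB_test (b n : Int) (hb : 2 ≤ b) (hn : 0 ≤ n) :
    (pvRevLoop b n.toNat 0 n == n) =
      decide (pvDigits b n.toNat n = (pvDigits b n.toNat n).reverse) := by
  have hbounds := pvDigits_bounds b hb n.toNat n
  have hval := pvDigits_val b hb n.toNat n hn (le_refl _)
  set l := pvDigits b n.toNat n with hl
  have hrev : pvRevLoop b n.toNat 0 n = pvValLE b l.reverse := by
    rw [pvRevLoop_eq, ← hl, pvFoldl_eq_valLE_reverse]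
    ring
  rw [hrev, Bool.eq_iff_iff]
  simp only [beq_iff_eq, decide_eq_true_iff]
  constructor
  · intro h
    rw [← hval] at h
    exact (pvValLE_inj b hb l.reverse l (by simp)
      (fun d hd => hbounds d (List.mem_reverse.mp hd)) hbounds h).symm
  · intro h
    rw [← h]
    exact hval

-- count bridge: A's foldl counter equals countP
theorem pvCount_eq (pA pB : Int → Bool) (l : List Int) (hpt : ∀ b ∈ l, pA b = pB b) :
    ∀ init : Int,
      l.foldl (fun c b => if pA b then c + 1 else c) init = init + (l.countP pB : Int) := by
  induction l with
  | nil => intro init; simp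
  | cons a t ih =>
    intro init
    have ha := hpt a (by simp)
    have iht := ih (fun b hb => hpt b (by simp [hb]))
    by_cases h : pA a
    · simp [List.foldl, ← ha, h, iht]; ring
    · simp [List.foldl, ← ha, h, iht]

-- ===== VERDICT (by name: the statement is the Claim_ definition above) =====
theorem check_dual_spec : Claim_equal_check_dual := by
  intro n _ hpre
  unfold Spec_check_dual check_dual check_dual_alt
  have hrange : PySem.List.pyRange 2 11 1 = [2,3,4,5,6,7,8,9,10] := by decide
  have hpt : ∀ b ∈ PySem.List.pyRange 2 11 1,
      is_palin (parse_num_to_base b n) = (pvRevLoop b n.toNat 0 n == n) := by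
    intro b hb
    rw [hrange] at hb
    have hbnd : 2 ≤ b ∧ b ≤ 10 := by
      simp at hb; rcases hb with rfl|rfl|rfl|rfl|rfl|rfl|rfl|rfl|rfl <;> omega
    rw [pvA_test b n hbnd.1 hbnd.2 hpre, pvB_test b n hbnd.1 hpre]
  rw [pvCount_eq _ _ _ hpt 0]
  simp only [zero_add]
  set c := (PySem.List.pyRange 2 11 1).countP (fun base => pvRevLoop base n.toNat 0 n == n)
  by_cases hc : c > 1
  · rw [if_pos (by exact_mod_cast hc), decide_eq_true_iff.mpr hc]
  · rw [if_neg (by exact_mod_cast hc), eq_comm, decide_eq_false_iff_not]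
    exact hc
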